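-- pv_equiv track=rewrite | github.com/scalar438/nono_solver | tests/codewars/sol.py | calc_placeability
-- ===== SOURCE A (Python) =====
-- FILLED = 1
--
-- EMPTY = 2
--
-- def calc_placeability(cells: list[int], blocks: list[int]):
--     n = len(cells)
--     i = 0
--     while i != n and cells[i] != FILLED:
--         i += 1
--     res = [True] * (i + 1) + [False] * (n - i)
--     res = [res]
--
--     for ib, block_len in enumerate(blocks):
--         end_allow_list = [False]
--         cur_matched = 0
--         for i, cell in enumerate(cells):
--             if cell == EMPTY:
--                 cur_matched = 0
--             else:
--                 cur_matched += 1
--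
--             def calc_current_flag():
--                 if cur_matched < block_len:
--                     return False
--                 start_current_block = i - block_len + 1
--                 if ib != 0:
--                     start_current_block -= 1
--                 if start_current_block < 0:
--                     return False
--                 return (ib == 0 or cells[start_current_block] != FILLED) and res[-1][start_current_block]
--             end_allow_list.append(calc_current_flag())
--         for i in range(n):
--             if end_allow_list[i] and not end_allow_list[i + 1] and cells[i] != FILLED:
--                 end_allow_list[i + 1] = True
--         res.append(end_allow_list)
--     return res
-- ===== SOURCE B (Python) =====
-- FILLED = 1
--
-- EMPTY = 2
--
-- def calc_placeability(cells: list[int], blocks: list[int]):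
--     n = len(cells)
--     # Global precomputation: prefix counts of EMPTY / FILLED cells and the
--     # index of the last FILLED cell strictly before each position (-1 if none).
--     pe = [0]
--     pf = [0]
--     lf = [-1]
--     e = f = 0
--     l = -1
--     for i, c in enumerate(cells):
--         if c == EMPTY:
--             e += 1
--         if c == FILLED:
--             f += 1
--             l = i
--         pe.append(e)
--         pf.append(f)
--         lf.append(l)
--     prev = [pf[j] == 0 for j in range(n + 1)]
--     res = [prev]
--     for ib, blen in enumerate(blocks):
--         # cnt[j] = how many placement positions i < j admit this block ending at i
--         cnt = [0]
--         k = 0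
--         for i in range(n):
--             s = i - blen + 1 - (0 if ib == 0 else 1)
--             if (s >= 0 and pe[i + 1] - pe[i - blen + 1] == 0
--                     and (ib == 0 or cells[s] != FILLED) and prev[s]):
--                 k += 1
--             cnt.append(k)
--         # row[j]: some placement ends in (lf[j], j), i.e. after the last FILLED cell
--         row = [cnt[j] > cnt[max(lf[j], 0)] for j in range(n + 1)]
--         res.append(row)
--         prev = row
--     return res
-- ===== Notes on version B (the rewrite author's own statement) =====
-- stated objective: alternative
-- what changed: B replaces A's per-block carry DP (flag pass with a running counter plus an in-place carry-forward fix-up pass) by precomputed prefix-count tables of EMPTY/FILLED cells and a last-FILLED-index table, computing each row cell as a range-count comparison cnt[j] > cnt[max(lf[j],0)] over a prefix-sum of admissible placement positions, so no carry state or list mutation exists.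
import Mathlib
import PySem

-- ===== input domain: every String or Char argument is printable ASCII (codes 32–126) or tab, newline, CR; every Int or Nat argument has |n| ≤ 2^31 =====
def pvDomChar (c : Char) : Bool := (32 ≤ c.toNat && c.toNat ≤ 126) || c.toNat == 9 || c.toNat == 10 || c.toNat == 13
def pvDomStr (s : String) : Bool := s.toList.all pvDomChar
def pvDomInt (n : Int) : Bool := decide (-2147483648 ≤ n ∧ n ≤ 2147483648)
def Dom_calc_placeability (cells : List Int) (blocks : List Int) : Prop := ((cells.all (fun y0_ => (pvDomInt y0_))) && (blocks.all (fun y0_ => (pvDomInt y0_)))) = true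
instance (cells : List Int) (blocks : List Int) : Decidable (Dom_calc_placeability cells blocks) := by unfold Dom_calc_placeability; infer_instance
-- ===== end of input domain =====

-- B replaces A's per-block carry DP and fix-up pass by prefix-count tables and
-- range-count queries (objective: alternative algorithm, same asymptotic cost).

-- ===== PORT A =====
def pvFILLED : Int := 1
def pvEMPTY : Int := 2

-- A's while loop: advance i while i != n and cells[i] != FILLED
def pvWhileA : List Int → Nat
  | [] => 0
  | c :: rest => if c = pvFILLED then 0 else pvWhileA rest + 1

-- A's calc_current_flag (cur = cur_matched at index i)
def pvFlagA (cells : List Int) (prev : List Bool) (ib : Nat) (blen : Int) (i : Nat) (cur : Int) : Bool :=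
  if cur < blen then false
  else
    let s0 : Int := (i : Int) - blen + 1
    let s : Int := if ib ≠ 0 then s0 - 1 else s0
    if s < 0 then false
    else (decide (ib = 0) || decide (cells.getD s.toNat 0 ≠ pvFILLED)) && prev.getD s.toNat false

-- A's first inner pass (enumerate over cells, cur_matched counter, appends)
def pvRowA (cells : List Int) (prev : List Bool) (ib : Nat) (blen : Int) : List Bool :=
  ((cells.zipIdx).foldl (fun (st : Int × List Bool) ci =>
    let cur : Int := if ci.1 = pvEMPTY then 0 else st.1 + 1
    (cur, st.2 ++ [pvFlagA cells prev ib blen ci.2 cur])) ((0 : Int), [false])).2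

-- A's second inner pass (for i in range(n): conditional in-place set)
def pvPassA (cells : List Int) (row : List Bool) : List Bool :=
  (List.range cells.length).foldl (fun r i =>
    if r.getD i false && !(r.getD (i+1) false) && decide (cells.getD i 0 ≠ pvFILLED)
    then r.set (i+1) true else r) row

def calc_placeability (cells : List Int) (blocks : List Int) : List (List Bool) :=
  let n := cells.length
  let i := pvWhileA cells
  let res0 : List Bool := List.replicate (i+1) true ++ List.replicate (n - i) false
  blocks.zipIdx.foldl (fun res bi =>
    res ++ [pvPassA cells (pvRowA cells (res.getLastD []) bi.2 bi.1)]) [res0]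

-- ===== PORT B =====
-- one pass building pe (prefix EMPTY count), pf (prefix FILLED count),
-- lf (last FILLED index before position, -1 if none)
def pvTablesB (cells : List Int) : List Int × List Int × List Int :=
  (cells.zipIdx.foldl (fun (st : (Int × Int × Int) × (List Int × List Int × List Int)) ci =>
      let e := if ci.1 = pvEMPTY then st.1.1 + 1 else st.1.1
      let f := if ci.1 = pvFILLED then st.1.2.1 + 1 else st.1.2.1
      let l := if ci.1 = pvFILLED then (ci.2 : Int) else st.1.2.2
      ((e, f, l), (st.2.1 ++ [e], st.2.2.1 ++ [f], st.2.2.2 ++ [l])))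
    (((0 : Int), (0 : Int), (-1 : Int)), ([0], [0], [-1]))).2

-- cnt[j] = number of admissible placement positions i < j for this block
def pvCntB (cells pe : List Int) (prev : List Bool) (ib : Nat) (blen : Int) : List Int :=
  ((List.range cells.length).foldl (fun (st : Int × List Int) (i : Nat) =>
    let s : Int := (i : Int) - blen + 1 - (if ib = 0 then 0 else 1)
    let k := if decide (0 ≤ s) && decide (pe.getD (i+1) 0 - pe.getD ((i : Int) - blen + 1).toNat 0 = 0)
               && (decide (ib = 0) || decide (cells.getD s.toNat 0 ≠ pvFILLED)) && prev.getD s.toNat false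
             then st.1 + 1 else st.1
    (k, st.2 ++ [k])) ((0 : Int), [0])).2

-- row[j]: some admissible placement position lies in (lf[j], j)
def pvRowB (cells pe lf : List Int) (prev : List Bool) (ib : Nat) (blen : Int) : List Bool :=
  let cnt := pvCntB cells pe prev ib blen
  (List.range (cells.length + 1)).map (fun j =>
    decide (cnt.getD j 0 > cnt.getD (max (lf.getD j (-1)) 0).toNat 0))

def calc_placeability_alt (cells : List Int) (blocks : List Int) : List (List Bool) :=
  let n := cells.length
  let t := pvTablesB cells
  let prev0 := (List.range (n+1)).map (fun j => decide (t.2.1.getD j 0 = 0))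
  (blocks.zipIdx.foldl (fun (st : List (List Bool) × List Bool) bi =>
    let row := pvRowB cells t.1 t.2.2 st.2 bi.2 bi.1
    (st.1 ++ [row], row)) ([prev0], prev0)).1

-- ===== PRECONDITION & SPEC =====
-- Pre_ excludes exactly the inputs where A raises IndexError: a negative block
-- length with nonempty cells makes A index cells/res past the right end.
def Pre_calc_placeability (cells : List Int) (blocks : List Int) : Prop :=
  cells = [] ∨ ∀ b ∈ blocks, 0 ≤ b
instance (cells : List Int) (blocks : List Int) : Decidable (Pre_calc_placeability cells blocks) := by
  unfold Pre_calc_placeability; infer_instance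
def pvWitness_calc_placeability : List Int × List Int := ([1, 0, 2], [2, 1])

def Spec_calc_placeability (cells : List Int) (blocks : List Int) (out : List (List Bool)) : Prop := out = calc_placeability_alt cells blocks
instance (cells : List Int) (blocks : List Int) (out : List (List Bool)) : Decidable (Spec_calc_placeability cells blocks out) := by unfold Spec_calc_placeability; infer_instance

-- ===== CLAIM (what is proved, stated in full; the proofs are below) =====
def Claim_equal_calc_placeability : Prop := ∀ (cells : List Int) (blocks : List Int), Dom_calc_placeability cells blocks → Pre_calc_placeability cells blocks → Spec_calc_placeability cells blocks (calc_placeability cells blocks)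

-- ===== LEMMAS AND PROOFS =====

-- functional specs of B's tables
def peF (cells : List Int) : Nat → Int
  | 0 => 0
  | j+1 => peF cells j + (if cells.getD j 0 = pvEMPTY then 1 else 0)

def pfF (cells : List Int) : Nat → Int
  | 0 => 0
  | j+1 => pfF cells j + (if cells.getD j 0 = pvFILLED then 1 else 0)

def lfF (cells : List Int) : Nat → Int
  | 0 => -1
  | j+1 => if cells.getD j 0 = pvFILLED then (j : Int) else lfF cells j

def runF (cells : List Int) : Nat → Int
  | 0 => 0
  | j+1 => if cells.getD j 0 = pvEMPTY then 0 else runF cells j + 1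

def cntF (g : Nat → Bool) : Nat → Int
  | 0 => 0
  | j+1 => cntF g j + (if g j then 1 else 0)

def mIdx (cells : List Int) (j : Nat) : Nat := (max (lfF cells j) 0).toNat

-- B's admissibility test, written over the functional tables
def okB (cells : List Int) (prev : List Bool) (ib : Nat) (blen : Int) (i : Nat) : Bool :=
  let s : Int := (i : Int) - blen + 1 - (if ib = 0 then 0 else 1)
  decide (0 ≤ s) && decide (peF cells (i+1) - peF cells ((i : Int) - blen + 1).toNat = 0)
    && (decide (ib = 0) || decide (cells.getD s.toNat 0 ≠ pvFILLED)) && prev.getD s.toNat false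

-- the carry sequence that A's two passes realise
def vF (cells : List Int) (g : Nat → Bool) : Nat → Bool
  | 0 => false
  | j+1 => g j || (vF cells g j && decide (cells.getD j 0 ≠ pvFILLED))

-- ---- A's first pass as a list of flags (cur_matched threaded as a seed) ----
def pvRunSpec (r : Int) : List Int → List Int
  | [] => []
  | c :: cs => (if c = pvEMPTY then (0:Int) else r + 1) :: pvRunSpec (if c = pvEMPTY then (0:Int) else r + 1) cs

def pvFlags (cells : List Int) (prev : List Bool) (ib : Nat) (blen : Int) : Nat → Int → List Int → List Bool
  | _, _, [] => []
  | i, r, c :: cs =>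
    pvFlagA cells prev ib blen i (if c = pvEMPTY then (0:Int) else r + 1) ::
      pvFlags cells prev ib blen (i+1) (if c = pvEMPTY then (0:Int) else r + 1) cs

theorem pvFlags_length (cells : List Int) (prev : List Bool) (ib : Nat) (blen : Int) :
    ∀ (cs : List Int) (i : Nat) (r : Int), (pvFlags cells prev ib blen i r cs).length = cs.length := by
  intro cs; induction cs with
  | nil => intro i r; rfl
  | cons c cs ih => intro i r; simp [pvFlags, ih]

theorem pvRowA_fold (cells : List Int) (prev : List Bool) (ib : Nat) (blen : Int) :
    ∀ (cs : List Int) (k : Nat) (r : Int) (acc : List Bool),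
    ((cs.zipIdx k).foldl (fun (st : Int × List Bool) ci =>
      let cur : Int := if ci.1 = pvEMPTY then 0 else st.1 + 1
      (cur, st.2 ++ [pvFlagA cells prev ib blen ci.2 cur])) (r, acc)).2
    = acc ++ pvFlags cells prev ib blen k r cs := by
  intro cs; induction cs with
  | nil => intro k r acc; simp [pvFlags]
  | cons c cs ih =>
    intro k r acc
    simp only [List.zipIdx_cons, List.foldl_cons, pvFlags, ih, List.append_assoc, List.singleton_append]

theorem pvRowA_eq (cells : List Int) (prev : List Bool) (ib : Nat) (blen : Int) :
    pvRowA cells prev ib blen = false :: pvFlags cells prev ib blen 0 0 cells := by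
  simpa [pvRowA] using pvRowA_fold cells prev ib blen cells 0 0 [false]

theorem pvFlags_getD (cells : List Int) (prev : List Bool) (ib : Nat) (blen : Int) :
    ∀ (cs : List Int) (i : Nat) (r : Int) (j : Nat), j < cs.length →
    (pvFlags cells prev ib blen i r cs).getD j false
      = pvFlagA cells prev ib blen (i + j) ((pvRunSpec r cs).getD j 0) := by
  intro cs; induction cs with
  | nil => intro i r j h; simp at h
  | cons c cs ih =>
    intro i r j h
    cases j with
    | zero => simp [pvFlags, pvRunSpec]
    | succ j =>
      have hj : j < cs.length := by simpa using h
      simp only [pvFlags, pvRunSpec, List.getD_cons_succ]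
      rw [ih]
      · ring_nf
      · exact hj

-- the seed of pvRunSpec at a suffix equals runF, elementwise
theorem runSpec_getD (cells : List Int) :
    ∀ (cs : List Int) (k : Nat), k + cs.length = cells.length →
    (∀ j, j < cs.length → cs.getD j 0 = cells.getD (k+j) 0) →
    ∀ j, j < cs.length → (pvRunSpec (runF cells k) cs).getD j 0 = runF cells (k+j+1) := by
  intro cs; induction cs with
  | nil => intro k _ _ j hj; simp at hj
  | cons c cs ih =>
    intro k hlen hget j hj
    have hc : c = cells.getD k 0 := by simpa using hget 0 (by simp)
    have hstep : (if c = pvEMPTY then (0:Int) else runF cells k + 1) = runF cells (k+1) := by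
      simp [runF, hc]
    cases j with
    | zero => simpa [pvRunSpec] using hstep
    | succ j =>
      have hj' : j < cs.length := by simpa using hj
      simp only [pvRunSpec, List.getD_cons_succ, hstep]
      have := ih (k+1) (by simpa [Nat.add_comm, Nat.add_left_comm] using hlen)
        (fun j hjl => by simpa [Nat.add_comm, Nat.add_left_comm, Nat.add_assoc] using hget (j+1) (by simpa using Nat.succ_lt_succ hjl)) j hj'
      simpa [Nat.add_comm, Nat.add_left_comm, Nat.add_assoc] using this

-- ---- A's second pass over an explicit flag list ----
def pvGenA (cells : List Int) : Bool → Nat → List Bool → List Bool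
  | _, _, [] => []
  | v, k, f :: fs =>
    (f || (v && decide (cells.getD k 0 ≠ pvFILLED))) ::
      pvGenA cells (f || (v && decide (cells.getD k 0 ≠ pvFILLED))) (k+1) fs

theorem set_middle (front : List Bool) (b w : Bool) (fs : List Bool) :
    (front ++ b :: w :: fs).set (front.length + 1) true = front ++ b :: true :: fs := by
  rw [List.set_append_right _ _ (by omega)]
  simp

theorem getD_append_self (front : List Bool) (l : List Bool) (d : Bool) :
    (front ++ l).getD front.length d = l.getD 0 d := by
  simp [List.getD, List.getElem?_append_right (le_refl front.length)]

theorem getD_append_succ (front : List Bool) (b : Bool) (l : List Bool) (d : Bool) :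
    (front ++ b :: l).getD (front.length + 1) d = l.getD 0 d := by
  have : (front ++ b :: l).getD (front.length + 1) d = (b :: l).getD 1 d := by
    simp [List.getD, List.getElem?_append_right (by omega : front.length ≤ front.length + 1)]
  simpa using this

theorem pvPassA_fold (cells : List Int) :
    ∀ (fs front : List Bool) (b : Bool),
    ((List.range' front.length fs.length).foldl (fun r i =>
      if r.getD i false && !(r.getD (i+1) false) && decide (cells.getD i 0 ≠ pvFILLED)
      then r.set (i+1) true else r) (front ++ b :: fs))
    = front ++ b :: pvGenA cells b front.length fs := by
  intro fs; induction fs with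
  | nil => intro front b; simp [pvGenA]
  | cons f fs ih =>
    intro front b
    rw [List.length_cons, List.range'_succ, List.foldl_cons]
    have h1 : (front ++ b :: f :: fs).getD front.length false = b := by
      simpa using getD_append_self front (b :: f :: fs) false
    have h2 : (front ++ b :: f :: fs).getD (front.length + 1) false = f := by
      simpa using getD_append_succ front b (f :: fs) false
    rw [h1, h2]
    have hrow : (if (b && !f && decide (cells.getD front.length 0 ≠ pvFILLED)) = true
        then (front ++ b :: f :: fs).set (front.length + 1) true
        else front ++ b :: f :: fs)
        = front ++ b :: (f || (b && decide (cells.getD front.length 0 ≠ pvFILLED))) :: fs := by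
      generalize decide (cells.getD front.length 0 ≠ pvFILLED) = g
      cases b <;> cases f <;> cases g <;> simp [set_middle]
    rw [hrow]
    have hre : front ++ b :: (f || (b && decide (cells.getD front.length 0 ≠ pvFILLED))) :: fs
        = (front ++ [b]) ++ (f || (b && decide (cells.getD front.length 0 ≠ pvFILLED))) :: fs := by
      simp
    rw [hre]
    have := ih (front ++ [b]) (f || (b && decide (cells.getD front.length 0 ≠ pvFILLED)))
    simp only [List.length_append, List.length_cons, List.length_nil] at this ⊢
    rw [this]
    simp [pvGenA]

-- pvGenA over a flag list that agrees pointwise with g is the vF carry sequence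
theorem genA_map (cells : List Int) (g : Nat → Bool) :
    ∀ (fs : List Bool) (k : Nat),
    (∀ j, j < fs.length → fs.getD j false = g (k + j)) →
    pvGenA cells (vF cells g k) k fs = (List.range' (k+1) fs.length).map (vF cells g) := by
  intro fs; induction fs with
  | nil => intro k _; rfl
  | cons f fs ih =>
    intro k h
    have h0 : f = g k := by simpa using h 0 (by simp)
    have hrest : ∀ j, j < fs.length → fs.getD j false = g ((k+1) + j) := by
      intro j hj
      have := h (j+1) (by simpa using Nat.succ_lt_succ hj)
      simpa [Nat.add_comm, Nat.add_left_comm, Nat.add_assoc] using this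
    have hv : (f || (vF cells g k && decide (cells.getD k 0 ≠ pvFILLED))) = vF cells g (k+1) := by
      simp [vF, h0]
    simp only [pvGenA, List.length_cons, List.range'_succ, List.map_cons, hv]
    rw [ih (k+1) hrest]

-- A's whole row, as a map of the carry sequence
theorem rowA_eq_map (cells : List Int) (prev : List Bool) (ib : Nat) (blen : Int) :
    pvPassA cells (pvRowA cells prev ib blen)
      = (List.range (cells.length + 1)).map
          (vF cells (fun i => pvFlagA cells prev ib blen i (runF cells (i+1)))) := by
  rw [pvRowA_eq]
  unfold pvPassA
  have hlen := pvFlags_length cells prev ib blen cells 0 0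
  rw [List.range_eq_range']
  have hfold := pvPassA_fold cells (pvFlags cells prev ib blen 0 0 cells) [] false
  simp only [List.length_nil, List.nil_append] at hfold
  rw [← hlen, hfold]
  have hpt : ∀ j, j < (pvFlags cells prev ib blen 0 0 cells).length →
      (pvFlags cells prev ib blen 0 0 cells).getD j false
        = (fun i => pvFlagA cells prev ib blen i (runF cells (i+1))) (0 + j) := by
    intro j hj
    rw [hlen] at hj
    rw [pvFlags_getD cells prev ib blen cells 0 0 j hj]
    have hrs := runSpec_getD cells cells 0 (by simp) (fun t _ => by simp) j hj
    rw [show runF cells 0 = 0 from rfl] at hrs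
    exact congrArg (pvFlagA cells prev ib blen (0 + j)) hrs
  have := genA_map cells (fun i => pvFlagA cells prev ib blen i (runF cells (i+1)))
    (pvFlags cells prev ib blen 0 0 cells) 0 hpt
  simp only [vF] at this
  rw [this, hlen]
  have hr : List.range (cells.length + 1) = 0 :: List.range' 1 cells.length := by
    rw [List.range_eq_range', List.range'_succ]
  rw [hr]
  simp [vF]

-- ---- arithmetic characterisations ----
theorem cntF_mono (g : Nat → Bool) : ∀ {a b : Nat}, a ≤ b → cntF g a ≤ cntF g b := by
  intro a b h
  induction b with
  | zero => simp_all
  | succ b ih =>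
    rcases Nat.lt_or_ge a (b+1) with h' | h'
    · have := ih (by omega)
      simp only [cntF]; split_ifs <;> omega
    · have : a = b + 1 := by omega
      simp [this]

theorem lfF_lt (cells : List Int) : ∀ j, lfF cells j < (j : Nat) := by
  intro j; induction j with
  | zero => simp [lfF]
  | succ j ih =>
    simp only [lfF]
    split_ifs <;> push_cast <;> omega

theorem mIdx_le (cells : List Int) (j : Nat) : mIdx cells j ≤ j := by
  have := lfF_lt cells j
  unfold mIdx
  omega

theorem vF_cnt (cells : List Int) (g : Nat → Bool) :
    ∀ j, vF cells g j = decide (cntF g j > cntF g (mIdx cells j)) := by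
  intro j; induction j with
  | zero => simp [vF, cntF, mIdx, lfF]
  | succ j ih =>
    have hlf : lfF cells (j+1) = if cells.getD j 0 = pvFILLED then (j : Int) else lfF cells j := rfl
    by_cases hf : cells.getD j 0 = pvFILLED
    · have hm : mIdx cells (j+1) = j := by unfold mIdx; rw [hlf, if_pos hf]; omega
      have hd : decide (cells.getD j 0 ≠ pvFILLED) = false := decide_eq_false (not_not_intro hf)
      simp only [vF, ih, hm, cntF, hd, Bool.and_false, Bool.or_false]
      cases hg : g j <;> simp [hg] <;> omega
    · have hm : mIdx cells (j+1) = mIdx cells j := by unfold mIdx; rw [hlf, if_neg hf]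
      have hmono : cntF g (mIdx cells j) ≤ cntF g j := cntF_mono g (mIdx_le cells j)
      have hd : decide (cells.getD j 0 ≠ pvFILLED) = true := decide_eq_true hf
      simp only [vF, ih, hm, cntF, hd, Bool.and_true]
      cases hg : g j <;> simp [hg] <;> omega

theorem peF_mono (cells : List Int) : ∀ {a b : Nat}, a ≤ b → peF cells a ≤ peF cells b := by
  intro a b h
  induction b with
  | zero => simp_all
  | succ b ih =>
    rcases Nat.lt_or_ge a (b+1) with h' | h'
    · have := ih (by omega)
      simp only [peF]; split_ifs <;> omega
    · have : a = b + 1 := by omega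
      simp [this]

theorem peF_eq_iff (cells : List Int) :
    ∀ (a b : Nat), b ≤ a →
    (peF cells a = peF cells b ↔ ∀ t, b ≤ t → t < a → cells.getD t 0 ≠ pvEMPTY) := by
  intro a; induction a with
  | zero =>
    intro b h
    interval_cases b
    simp [peF]
  | succ a ih =>
    intro b h
    rcases Nat.lt_or_ge b (a+1) with h' | h'
    · have hb : b ≤ a := by omega
      have hmono := peF_mono cells hb
      have hstep : peF cells (a+1) = peF cells a + (if cells.getD a 0 = pvEMPTY then 1 else 0) := rfl
      constructor
      · intro heq t hbt hta
        have hEa : cells.getD a 0 ≠ pvEMPTY := by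
          intro hE
          rw [hstep, if_pos hE] at heq
          omega
        have heq' : peF cells a = peF cells b := by
          rw [hstep, if_neg hEa] at heq; omega
        rcases Nat.lt_or_ge t a with ht | ht
        · exact (ih b hb).mp heq' t hbt ht
        · have : t = a := by omega
          subst this; exact hEa
      · intro hall
        have h1 : peF cells a = peF cells b := (ih b hb).mpr (fun t h1 h2 => hall t h1 (by omega))
        have h2 : cells.getD a 0 ≠ pvEMPTY := hall a hb (by omega)
        rw [hstep, if_neg h2, h1]; omega
    · have : b = a + 1 := by omega
      subst this
      constructor
      · intro _ t h1 h2; exact absurd h2 (by omega)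
      · intro _; rfl

theorem runF_nonneg (cells : List Int) : ∀ j, 0 ≤ runF cells j := by
  intro j; induction j with
  | zero => simp [runF]
  | succ j ih => simp only [runF]; split_ifs <;> omega

theorem runF_ge_iff (cells : List Int) (b : Int) (hb : 0 ≤ b) :
    ∀ j, (b ≤ runF cells j ↔ b ≤ (j : Int) ∧ ∀ t : Nat, t < j → (j : Int) - b ≤ (t : Int) → cells.getD t 0 ≠ pvEMPTY) := by
  intro j; induction j generalizing b hb with
  | zero => simp [runF]
  | succ j ih =>
    by_cases hE : cells.getD j 0 = pvEMPTY
    · simp only [runF, if_pos hE]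
      constructor
      · intro hle
        have : b = 0 := by omega
        subst this
        constructor
        · push_cast; omega
        · intro t ht1 ht2; push_cast at ht2; omega
      · rintro ⟨_, hall⟩
        by_contra hcon
        have hb1 : 1 ≤ b := by omega
        exact hall j (by omega) (by push_cast; omega) hE
    · simp only [runF, if_neg hE]
      by_cases hb0 : b = 0
      · subst hb0
        have := runF_nonneg cells j
        constructor
        · intro _; constructor
          · push_cast; omega
          · intro t ht1 ht2; push_cast at ht2; omega
        · intro _; omega
      · have hb1 : 0 ≤ b - 1 := by omega
        have ihb := ih (b-1) hb1
        constructor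
        · intro hle
          have := ihb.mp (by omega)
          constructor
          · push_cast; omega
          · intro t ht1 ht2
            rcases Nat.lt_or_ge t j with ht | ht
            · exact this.2 t ht (by push_cast at ht2 ⊢; omega)
            · have : t = j := by omega
              subst this; exact hE
        · rintro ⟨hbj, hall⟩
          have : b - 1 ≤ runF cells j := ihb.mpr ⟨by push_cast at hbj ⊢; omega,
            fun t ht1 ht2 => hall t (by omega) (by push_cast at ht2 ⊢; omega)⟩
          omega

-- A's flag (fed the streak value) equals B's prefix-count test
theorem flag_okB (cells : List Int) (prev : List Bool) (ib : Nat) (blen : Int)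
    (hb : 0 ≤ blen) (i : Nat) :
    pvFlagA cells prev ib blen i (runF cells (i+1)) = okB cells prev ib blen i := by
  unfold pvFlagA okB
  have hs : (if ib ≠ 0 then ((i : Int) - blen + 1) - 1 else (i : Int) - blen + 1)
      = (i : Int) - blen + 1 - (if ib = 0 then 0 else 1) := by
    by_cases h : ib = 0 <;> simp [h]
  simp only [hs]
  set s : Int := (i : Int) - blen + 1 - (if ib = 0 then 0 else 1) with hsdef
  by_cases hneg : s < 0
  · have h0 : decide ((0:Int) ≤ s) = false := decide_eq_false (by omega)
    rw [h0]
    simp only [Bool.false_and]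
    by_cases h1 : runF cells (i+1) < blen
    · rw [if_pos h1]
    · rw [if_neg h1, if_pos hneg]
  · have hs0 : 0 ≤ s := by omega
    have hsle : s ≤ (i : Int) - blen + 1 := by rw [hsdef]; split_ifs <;> omega
    have hblen : blen ≤ (i : Int) + 1 := by omega
    have ht0 : ((i : Int) - blen + 1).toNat = i + 1 - blen.toNat := by omega
    have hkey : (¬ runF cells (i+1) < blen) ↔ peF cells (i+1) - peF cells ((i : Int) - blen + 1).toNat = 0 := by
      rw [not_lt]
      rw [runF_ge_iff cells blen hb (i+1)]
      have hle : ((i : Int) - blen + 1).toNat ≤ i + 1 := by omega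
      rw [show (peF cells (i+1) - peF cells ((i : Int) - blen + 1).toNat = 0)
            ↔ peF cells (i+1) = peF cells ((i : Int) - blen + 1).toNat by omega]
      rw [peF_eq_iff cells (i+1) _ hle]
      constructor
      · rintro ⟨_, hall⟩ t h1 h2
        exact hall t h2 (by omega)
      · intro hall
        refine ⟨by push_cast; omega, fun t h1 h2 => hall t (by omega) h1⟩
    by_cases hrun : runF cells (i+1) < blen
    · rw [if_pos hrun]
      have : ¬ (peF cells (i+1) - peF cells ((i : Int) - blen + 1).toNat = 0) := by
        intro h; exact absurd hrun (hkey.mpr h)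
      simp [hs0, this]
    · rw [if_neg hrun, if_neg (by omega : ¬ s < 0)]
      have := hkey.mp hrun
      simp [hs0, this]

-- ---- initial row ----
theorem pfF_nonneg (cells : List Int) : ∀ j, 0 ≤ pfF cells j := by
  intro j; induction j with
  | zero => simp [pfF]
  | succ j ih => simp only [pfF]; split_ifs <;> omega

theorem pfF_eq_zero (cells : List Int) :
    ∀ j, (pfF cells j = 0 ↔ ∀ t, t < j → cells.getD t 0 ≠ pvFILLED) := by
  intro j; induction j with
  | zero => simp [pfF]
  | succ j ih =>
    have hnn := pfF_nonneg cells j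
    constructor
    · intro h t ht
      have h1 : pfF cells j = 0 ∧ cells.getD j 0 ≠ pvFILLED := by
        simp only [pfF] at h; split_ifs at h with hF
        · omega
        · exact ⟨by omega, hF⟩
      rcases Nat.lt_or_ge t j with h' | h'
      · exact ih.mp h1.1 t h'
      · have : t = j := by omega
        subst this; exact h1.2
    · intro h
      have h1 : pfF cells j = 0 := ih.mpr (fun t ht => h t (by omega))
      have h2 : cells.getD j 0 ≠ pvFILLED := h j (by omega)
      have hstep : pfF cells (j+1) = pfF cells j + (if cells.getD j 0 = pvFILLED then 1 else 0) := rfl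
      rw [hstep, if_neg h2, h1]
      omega

theorem whileA_ge_iff : ∀ (cells : List Int) (j : Nat), j ≤ cells.length →
    (j ≤ pvWhileA cells ↔ ∀ t, t < j → cells.getD t 0 ≠ pvFILLED) := by
  intro cells; induction cells with
  | nil =>
    intro j hj
    have hj0 : j = 0 := by simpa using hj
    subst hj0
    simp [pvWhileA]
  | cons c cs ih =>
    intro j hj
    cases j with
    | zero => simp
    | succ j =>
      by_cases hc : c = pvFILLED
      · simp only [pvWhileA, if_pos hc]
        constructor
        · omega
        · intro h; exact absurd hc (h 0 (by omega))
      · simp only [pvWhileA, if_neg hc]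
        have := ih j (by simpa using hj)
        constructor
        · intro h t ht
          cases t with
          | zero => simpa using hc
          | succ t => exact this.mp (by omega) t (by omega)
        · intro h
          have : j ≤ pvWhileA cs := this.mpr (fun t ht => by simpa using h (t+1) (by omega))
          omega

theorem pvWhileA_le (cells : List Int) : pvWhileA cells ≤ cells.length := by
  induction cells with
  | nil => simp [pvWhileA]
  | cons c cs ih => by_cases h : c = pvFILLED <;> simp [pvWhileA, h] <;> omega

theorem rep_eq_map (n i : Nat) (h : i ≤ n) :
    List.replicate (i+1) true ++ List.replicate (n - i) false
      = (List.range (n+1)).map (fun j => decide (j ≤ i)) := by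
  apply List.ext_getElem
  · simp; omega
  · intro j hj hj'
    simp only [List.getElem_map, List.getElem_range]
    by_cases hji : j ≤ i
    · rw [List.getElem_append_left (by simp; omega)]
      simp [hji]
    · rw [List.getElem_append_right (by simp; omega)]
      simp [hji]

-- ---- B's fold-built lists realise the functional tables ----
theorem getD_map_range {α : Type} (g : Nat → α) (n j : Nat) (d : α) :
    ((List.range n).map g).getD j d = if j < n then g j else d := by
  simp only [List.getD, List.getElem?_map, List.getElem?_range]
  split_ifs <;> simp_all

theorem tablesB_fold (cells : List Int) :
    ∀ (cs : List Int) (k : Nat), k + cs.length = cells.length →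
    (∀ j, j < cs.length → cs.getD j 0 = cells.getD (k+j) 0) →
    ((cs.zipIdx k).foldl (fun (st : (Int × Int × Int) × (List Int × List Int × List Int)) ci =>
      let e := if ci.1 = pvEMPTY then st.1.1 + 1 else st.1.1
      let f := if ci.1 = pvFILLED then st.1.2.1 + 1 else st.1.2.1
      let l := if ci.1 = pvFILLED then (ci.2 : Int) else st.1.2.2
      ((e, f, l), (st.2.1 ++ [e], st.2.2.1 ++ [f], st.2.2.2 ++ [l])))
      ((peF cells k, pfF cells k, lfF cells k),
       ((List.range (k+1)).map (peF cells), (List.range (k+1)).map (pfF cells), (List.range (k+1)).map (lfF cells))))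
    = ((peF cells cells.length, pfF cells cells.length, lfF cells cells.length),
       ((List.range (cells.length+1)).map (peF cells), (List.range (cells.length+1)).map (pfF cells),
        (List.range (cells.length+1)).map (lfF cells))) := by
  intro cs; induction cs with
  | nil =>
    intro k hlen _
    simp only [List.length_nil] at hlen
    subst hlen
    simp
  | cons c cs ih =>
    intro k hlen hget
    have hc : c = cells.getD k 0 := by simpa using hget 0 (by simp)
    have he : (if c = pvEMPTY then peF cells k + 1 else peF cells k) = peF cells (k+1) := by
      simp only [peF, hc]; split_ifs <;> omega
    have hf : (if c = pvFILLED then pfF cells k + 1 else pfF cells k) = pfF cells (k+1) := by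
      simp only [pfF, hc]; split_ifs <;> omega
    have hl : (if c = pvFILLED then (k : Int) else lfF cells k) = lfF cells (k+1) := by
      simp [lfF, hc]
    have hmap : ∀ (g : Nat → Int), (List.range (k+1)).map g ++ [g (k+1)] = (List.range (k+2)).map g := by
      intro g
      rw [show k+2 = (k+1)+1 by rfl]
      simp [List.range_succ]
    simp only [List.zipIdx_cons, List.foldl_cons, he, hf, hl]
    rw [hmap (peF cells), hmap (pfF cells), hmap (lfF cells)]
    exact ih (k+1) (by simpa [Nat.add_comm, Nat.add_left_comm] using hlen)
      (fun j hj => by simpa [Nat.add_comm, Nat.add_left_comm, Nat.add_assoc] using hget (j+1) (by simpa using Nat.succ_lt_succ hj))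

theorem tablesB_eq (cells : List Int) :
    pvTablesB cells = ((List.range (cells.length+1)).map (peF cells),
      (List.range (cells.length+1)).map (pfF cells), (List.range (cells.length+1)).map (lfF cells)) := by
  have h := tablesB_fold cells cells 0 (by simp) (fun j hj => by simp)
  exact congrArg Prod.snd h

theorem cnt_fold (g : Nat → Bool) :
    ∀ (m k : Nat),
    ((List.range' k m).foldl (fun (st : Int × List Int) (i : Nat) =>
      let kk := if g i then st.1 + 1 else st.1
      (kk, st.2 ++ [kk])) (cntF g k, (List.range (k+1)).map (cntF g)))
    = (cntF g (k+m), (List.range (k+m+1)).map (cntF g)) := by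
  intro m; induction m with
  | zero => intro k; simp
  | succ m ih =>
    intro k
    rw [List.range'_succ, List.foldl_cons]
    have hk : (if g k then cntF g k + 1 else cntF g k) = cntF g (k+1) := by
      simp only [cntF]; split_ifs <;> omega
    have hmap : (List.range (k+1)).map (cntF g) ++ [cntF g (k+1)] = (List.range (k+2)).map (cntF g) := by
      rw [show k+2 = (k+1)+1 by rfl]
      simp [List.range_succ]
    simp only [hk, hmap]
    rw [show k+(m+1) = k+1+m by omega]
    exact ih (k+1)

theorem pvCntB_eq (cells : List Int) (prev : List Bool) (ib : Nat) (blen : Int) (hb : 0 ≤ blen) :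
    pvCntB cells ((List.range (cells.length+1)).map (peF cells)) prev ib blen
      = (List.range (cells.length+1)).map (cntF (okB cells prev ib blen)) := by
  unfold pvCntB
  refine Eq.trans (congrArg Prod.snd (PySem.List.foldl_congr_mem _ _
    (fun (st : Int × List Int) (i : Nat) =>
      let kk := if okB cells prev ib blen i then st.1 + 1 else st.1
      (kk, st.2 ++ [kk])) _ ?_)) ?_
  · intro st i hi
    have hin : i < cells.length := List.mem_range.mp hi
    have h1 : ((List.range (cells.length+1)).map (peF cells)).getD (i+1) 0 = peF cells (i+1) := by
      rw [getD_map_range]; rw [if_pos (by omega)]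
    have h2 : ((List.range (cells.length+1)).map (peF cells)).getD ((i : Int) - blen + 1).toNat 0
        = peF cells ((i : Int) - blen + 1).toNat := by
      rw [getD_map_range]; rw [if_pos (by omega)]
    simp only [h1, h2]
    rfl
  · rw [List.range_eq_range']
    have h := cnt_fold (okB cells prev ib blen) cells.length 0
    simp only [Nat.zero_add] at h
    exact congrArg Prod.snd h

theorem rowB_eq (cells : List Int) (prev : List Bool) (ib : Nat) (blen : Int) (hb : 0 ≤ blen) :
    pvRowB cells ((List.range (cells.length+1)).map (peF cells)) ((List.range (cells.length+1)).map (lfF cells)) prev ib blen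
      = (List.range (cells.length+1)).map (vF cells (okB cells prev ib blen)) := by
  unfold pvRowB
  rw [pvCntB_eq cells prev ib blen hb]
  apply List.map_congr_left
  intro j hj
  have hjn : j < cells.length + 1 := List.mem_range.mp hj
  have h1 : ((List.range (cells.length+1)).map (cntF (okB cells prev ib blen))).getD j 0
      = cntF (okB cells prev ib blen) j := by rw [getD_map_range, if_pos hjn]
  have h2 : ((List.range (cells.length+1)).map (lfF cells)).getD j (-1) = lfF cells j := by
    rw [getD_map_range, if_pos hjn]
  have h3 : (max (lfF cells j) 0).toNat = mIdx cells j := rfl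
  have h4 : mIdx cells j < cells.length + 1 := by
    have := mIdx_le cells j; omega
  have h5 : ((List.range (cells.length+1)).map (cntF (okB cells prev ib blen))).getD (mIdx cells j) 0
      = cntF (okB cells prev ib blen) (mIdx cells j) := by rw [getD_map_range, if_pos h4]
  rw [h1, h2, h3, h5]
  rw [vF_cnt cells (okB cells prev ib blen) j]

-- ---- per-block row equality ----
theorem row_eq (cells : List Int) (prev : List Bool) (ib : Nat) (blen : Int)
    (hb : cells = [] ∨ 0 ≤ blen) :
    pvPassA cells (pvRowA cells prev ib blen)
      = pvRowB cells (pvTablesB cells).1 (pvTablesB cells).2.2 prev ib blen := by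
  rcases hb with hb | hb
  · subst hb
    rfl
  · rw [tablesB_eq]
    simp only
    rw [rowB_eq cells prev ib blen hb, rowA_eq_map]
    congr 1
    funext j
    congr 1
    funext i
    exact flag_okB cells prev ib blen hb i

-- ---- outer loop ----
theorem outer_eq (cells : List Int) :
    ∀ (bl : List (Int × Nat)) (res : List (List Bool)) (prev : List Bool),
    res.getLastD [] = prev →
    (∀ b ∈ bl, cells = [] ∨ 0 ≤ b.1) →
    bl.foldl (fun res bi =>
      res ++ [pvPassA cells (pvRowA cells (res.getLastD []) bi.2 bi.1)]) res
    = (bl.foldl (fun (st : List (List Bool) × List Bool) bi =>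
        let row := pvRowB cells (pvTablesB cells).1 (pvTablesB cells).2.2 st.2 bi.2 bi.1
        (st.1 ++ [row], row)) (res, prev)).1 := by
  intro bl; induction bl with
  | nil => intro res prev _ _; rfl
  | cons bi bl ih =>
    intro res prev hprev hall
    simp only [List.foldl_cons]
    rw [hprev, row_eq cells prev bi.2 bi.1 (by
      rcases hall bi (by simp) with h | h
      · exact Or.inl h
      · exact Or.inr h)]
    exact ih _ _ (by simp) (fun b hbm => hall b (by simp [hbm]))

-- ===== VERDICT (by name: the statement is the Claim_ definition above) =====
theorem calc_placeability_spec : Claim_equal_calc_placeability := by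
  intro cells blocks _dom pre
  unfold Spec_calc_placeability calc_placeability calc_placeability_alt
  simp only
  have hres0 : List.replicate (pvWhileA cells + 1) true ++ List.replicate (cells.length - pvWhileA cells) false
      = (List.range (cells.length + 1)).map (fun j => decide ((pvTablesB cells).2.1.getD j 0 = 0)) := by
    rw [rep_eq_map cells.length (pvWhileA cells) (pvWhileA_le cells)]
    rw [tablesB_eq]
    apply List.map_congr_left
    intro j hj
    have hjn : j < cells.length + 1 := List.mem_range.mp hj
    simp only
    rw [getD_map_range, if_pos hjn]
    have h1 := whileA_ge_iff cells j (by omega)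
    have h2 := pfF_eq_zero cells j
    by_cases h : ∀ t, t < j → cells.getD t 0 ≠ pvFILLED
    · rw [decide_eq_decide.mpr (h1.trans h2.symm)]
    · rw [decide_eq_decide.mpr (h1.trans h2.symm)]
  rw [hres0]
  apply outer_eq cells blocks.zipIdx _ _ (by simp)
  intro b hbm
  unfold Pre_calc_placeability at pre
  rcases pre with h | h
  · exact Or.inl h
  · exact Or.inr (h b.1 (by
      rw [List.mem_zipIdx_iff_getElem?] at hbm
      exact List.mem_of_getElem? hbm))
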